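-- pv_equiv track=rewrite | github.com/gmr/pgfmt | src/pgfmt/formatter.py | _indent_continuation
-- ===== SOURCE A (Python) =====
-- def _indent_continuation(
--     prefix: str,
--     content: str,
--     suffix: str = '',
-- ) -> str:
--     """Indent continuation lines of multi-line content.
--
--     The first line is prefixed with ``prefix``. Subsequent lines
--     are padded to align with the character after the prefix.
--     ``suffix`` is appended to the last line.
--     """
--     if '\n' not in content:
--         return f'{prefix}{content}{suffix}'
--     lines = content.split('\n')
--     pad = ' ' * len(prefix)
--     result = [f'{prefix}{lines[0]}']
--     for line in lines[1:]:
--         result.append(f'{pad}{line}')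
--     result[-1] += suffix
--     return '\n'.join(result)
-- ===== SOURCE B (Python) =====
-- def _indent_continuation(
--     prefix: str,
--     content: str,
--     suffix: str = '',
-- ) -> str:
--     """Indent continuation lines of multi-line content."""
--     return prefix + content.replace('\n', '\n' + ' ' * len(prefix)) + suffix
-- ===== Notes on version B (the rewrite author's own statement) =====
-- stated objective: simpler
-- what changed: Replaces the split/pad/append-loop/join pipeline (with its no-newline guard and result[-1] patch-up) by a single str.replace of each newline with newline+padding, sandwiched between prefix and suffix.
import Mathlib
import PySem

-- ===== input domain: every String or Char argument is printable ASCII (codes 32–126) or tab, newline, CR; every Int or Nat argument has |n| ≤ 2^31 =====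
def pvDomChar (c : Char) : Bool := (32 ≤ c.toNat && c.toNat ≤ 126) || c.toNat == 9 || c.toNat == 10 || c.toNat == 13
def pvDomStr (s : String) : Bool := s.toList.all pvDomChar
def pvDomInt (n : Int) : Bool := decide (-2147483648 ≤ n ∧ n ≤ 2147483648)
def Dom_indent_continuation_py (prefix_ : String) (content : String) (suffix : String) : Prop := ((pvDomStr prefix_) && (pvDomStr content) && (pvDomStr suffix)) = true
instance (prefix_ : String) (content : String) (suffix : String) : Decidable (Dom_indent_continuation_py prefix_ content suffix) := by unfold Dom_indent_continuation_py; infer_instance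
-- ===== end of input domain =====

-- ===== PORT A =====
-- B replaces A's split/pad/loop/join by a single newline substitution; return values proved equal.
-- helper: Python's `result[-1] += suffix` on the (always nonempty) result list
def pvAppendLast (xs : List (List Char)) (s : List Char) : List (List Char) :=
  match xs with
  | [] => []
  | [x] => [x ++ s]
  | x :: t => x :: pvAppendLast t s

def indent_continuation_py (prefix_ : String) (content : String) (suffix : String) : String :=
  if PySem.Str.isIn "\n" content = false then
    String.ofList (prefix_.toList ++ content.toList ++ suffix.toList)
  else
    let lines := PySem.Chars.splitOn content.toList ['\n']
    let pad := List.replicate (prefix_.toList.length) ' '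
    let result := (prefix_.toList ++ lines.headD []) :: (lines.tail.map (fun line => pad ++ line))
    String.ofList (PySem.Chars.join ['\n'] (pvAppendLast result suffix.toList))

-- ===== PORT B =====
def indent_continuation_py_alt (prefix_ : String) (content : String) (suffix : String) : String :=
  String.ofList (prefix_.toList ++
    PySem.Chars.replace content.toList ['\n'] ('\n' :: List.replicate (prefix_.toList.length) ' ') ++
    suffix.toList)

-- ===== PRECONDITION & SPEC =====
def Spec_indent_continuation_py (prefix_ : String) (content : String) (suffix : String) (out : String) : Prop := out = indent_continuation_py_alt prefix_ content suffix
instance (prefix_ : String) (content : String) (suffix : String) (out : String) : Decidable (Spec_indent_continuation_py prefix_ content suffix out) := by unfold Spec_indent_continuation_py; infer_instance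

-- ===== CLAIM (what is proved, stated in full; the proofs are below) =====
def Claim_equal_indent_continuation_py : Prop := ∀ (prefix_ : String) (content : String) (suffix : String), Dom_indent_continuation_py prefix_ content suffix → Spec_indent_continuation_py prefix_ content suffix (indent_continuation_py prefix_ content suffix)

-- ===== LEMMAS AND PROOFS =====

-- ===== VERDICT (by name: the statement is the Claim_ definition above) =====
-- proof helpers (specs of replace/splitOn specialised to a single-newline separator)
def pvRepl (pad : List Char) : List Char → List Char
  | [] => []
  | c :: t => if c = '\n' then '\n' :: (pad ++ pvRepl pad t) else c :: pvRepl pad t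

def pvSplitNL (pre : List Char) : List Char → List (List Char)
  | [] => [pre]
  | c :: t => if c = '\n' then pre :: pvSplitNL [] t else pvSplitNL (pre ++ [c]) t

lemma pvReplace_go_eq (pad : List Char) : ∀ (l : List Char) (fuel : Nat) (acc : List Char),
    l.length ≤ fuel →
    PySem.Chars.replace.go ['\n'] ('\n' :: pad) fuel l acc = acc.reverse ++ pvRepl pad l := by
  intro l
  induction l with
  | nil => intro fuel acc _; cases fuel <;> simp [PySem.Chars.replace.go, pvRepl]
  | cons c t ih =>
    intro fuel acc h
    cases fuel with
    | zero => simp at h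
    | succ f =>
      rw [PySem.Chars.replace.go]
      by_cases hc : c = '\n'
      · subst hc
        simp only [List.isPrefixOf, Bool.and_true, BEq.rfl, if_pos,
          List.length_cons, List.length_nil, List.drop_succ_cons, List.drop_zero]
        rw [ih f _ (by simpa using h)]
        simp [pvRepl]
      · simp only [List.isPrefixOf, Bool.and_true]
        rw [if_neg (by simpa using fun hh => hc hh.symm)]
        rw [ih f _ (by simpa using h)]
        simp [pvRepl, hc]

lemma pvReplace_eq (pad : List Char) (l : List Char) :
    PySem.Chars.replace l ['\n'] ('\n' :: pad) = pvRepl pad l := by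
  rw [PySem.Chars.replace]
  simp [pvReplace_go_eq pad l l.length [] le_rfl]

lemma pvSplitOn_go_eq : ∀ (l : List Char) (fuel : Nat) (cur : List Char) (acc : List (List Char)),
    l.length ≤ fuel →
    PySem.Chars.splitOn.go ['\n'] fuel l cur acc = acc.reverse ++ pvSplitNL cur.reverse l := by
  intro l
  induction l with
  | nil => intro fuel cur acc _; cases fuel <;> simp [PySem.Chars.splitOn.go, pvSplitNL]
  | cons c t ih =>
    intro fuel cur acc h
    cases fuel with
    | zero => simp at h
    | succ f =>
      rw [PySem.Chars.splitOn.go]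
      by_cases hc : c = '\n'
      · subst hc
        simp only [List.isPrefixOf, Bool.and_true, BEq.rfl, if_pos,
          List.length_cons, List.length_nil, List.drop_succ_cons, List.drop_zero]
        rw [ih f _ _ (by simpa using h)]
        simp [pvSplitNL]
      · simp only [List.isPrefixOf, Bool.and_true]
        rw [if_neg (by simpa using fun hh => hc hh.symm)]
        rw [ih f _ _ (by simpa using h)]
        simp [pvSplitNL, hc]

lemma pvSplitOn_eq (l : List Char) : PySem.Chars.splitOn l ['\n'] = pvSplitNL [] l := by
  rw [PySem.Chars.splitOn]
  simp [pvSplitOn_go_eq l (l.length + 1) [] [] (by omega)]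

lemma pvJoin_cons (x : List Char) (t : List (List Char)) :
    PySem.Chars.join ['\n'] (x :: t) = x ++ t.flatMap (fun y => '\n' :: y) := by
  induction t generalizing x with
  | nil => simp [PySem.Chars.join, List.intercalate]
  | cons y t ih =>
    have hstep : PySem.Chars.join ['\n'] (x :: y :: t) = x ++ '\n' :: PySem.Chars.join ['\n'] (y :: t) := by
      simp [PySem.Chars.join, List.intercalate]
    rw [hstep, ih]
    simp

lemma pvJoin_appendLast (s : List Char) : ∀ (x : List Char) (t : List (List Char)),
    PySem.Chars.join ['\n'] (pvAppendLast (x :: t) s) = PySem.Chars.join ['\n'] (x :: t) ++ s := by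
  intro x t
  induction t generalizing x with
  | nil => simp [pvAppendLast, PySem.Chars.join, List.intercalate]
  | cons y t ih =>
    have h1 : pvAppendLast (x :: y :: t) s = x :: pvAppendLast (y :: t) s := rfl
    have h2 : ∀ z (u : List (List Char)), PySem.Chars.join ['\n'] (x :: z :: u)
        = x ++ '\n' :: PySem.Chars.join ['\n'] (z :: u) := by
      intro z u; simp [PySem.Chars.join, List.intercalate]
    obtain ⟨z, u, hz⟩ : ∃ z u, pvAppendLast (y :: t) s = z :: u := by
      cases t <;> exact ⟨_, _, rfl⟩
    rw [h1, hz, h2, ← hz, ih, h2]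
    simp

lemma pvSplitNL_cons : ∀ (l pre : List Char), ∃ z u, pvSplitNL pre l = z :: u := by
  intro l
  induction l with
  | nil => intro pre; exact ⟨pre, [], rfl⟩
  | cons c t ih =>
    intro pre
    by_cases hc : c = '\n'
    · exact ⟨pre, pvSplitNL [] t, by simp [pvSplitNL, hc]⟩
    · obtain ⟨z, u, hz⟩ := ih (pre ++ [c])
      exact ⟨z, u, by simp [pvSplitNL, hc, hz]⟩

lemma pvSplit_glue (pad : List Char) : ∀ (l pre : List Char),
    (pvSplitNL pre l).headD [] ++ ((pvSplitNL pre l).tail).flatMap (fun y => '\n' :: (pad ++ y))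
      = pre ++ pvRepl pad l := by
  intro l
  induction l with
  | nil => intro pre; simp [pvSplitNL, pvRepl]
  | cons c t ih =>
    intro pre
    by_cases hc : c = '\n'
    · subst hc
      obtain ⟨z, u, hz⟩ := pvSplitNL_cons t []
      have h0 := ih []
      rw [hz] at h0
      simp only [List.headD_cons, List.tail_cons, List.nil_append] at h0
      simp only [pvSplitNL, pvRepl, hz, ← h0]
      simp
    · simp only [pvSplitNL, pvRepl, if_neg hc]
      rw [ih (pre ++ [c])]
      simp

lemma pvRepl_of_not_mem (pad : List Char) (l : List Char) (h : '\n' ∉ l) : pvRepl pad l = l := by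
  induction l with
  | nil => rfl
  | cons c t ih =>
    simp only [List.mem_cons, not_or] at h
    simp [pvRepl, Ne.symm h.1, ih h.2]

-- ===== VERDICT (by name: the statement is the Claim_ definition above) =====
theorem indent_continuation_py_spec : Claim_equal_indent_continuation_py := by
  intro p c s _
  unfold Spec_indent_continuation_py
  rw [indent_continuation_py, indent_continuation_py_alt, pvReplace_eq]
  by_cases hg : PySem.Str.isIn "\n" c = false
  · rw [if_pos hg]
    have hmem : '\n' ∉ c.toList := by
      intro hm
      have hni : PySem.Chars.isIn ['\n'] c.toList = false := by simpa using hg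
      rw [PySem.Chars.isIn_eq_false_iff] at hni
      exact hni ((List.singleton_infix_iff '\n' c.toList).mpr hm)
    rw [pvRepl_of_not_mem _ _ hmem]
  · rw [if_neg hg]
    obtain ⟨z, u, hz⟩ := pvSplitNL_cons c.toList []
    have hglue := pvSplit_glue (List.replicate p.toList.length ' ') c.toList []
    rw [hz] at hglue
    simp only [List.headD_cons, List.tail_cons, List.nil_append] at hglue
    simp only [pvSplitOn_eq, hz, List.headD_cons, List.tail_cons]
    rw [pvJoin_appendLast, pvJoin_cons]
    simp only [List.flatMap_map, List.append_assoc, ← hglue]
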